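-- pv_equiv track=rewrite | github.com/sofia5/adventOfCode | 2020/Day7/quiz2.py | findBags
-- ===== SOURCE A (Python) =====
-- def findBags(bags, bagToLookFrom, foundBags):
--     if bagToLookFrom in bags:
--         for bag in bags[bagToLookFrom]:
--             if bagToLookFrom in foundBags:
--                 foundBags[bagToLookFrom].append(bag)
--             else:
--                 foundBags[bagToLookFrom] = [bag]
--             findBags(bags, bag[0], foundBags)
--     return foundBags
-- ===== SOURCE B (Python) =====
-- def findBags(bags, bagToLookFrom, foundBags):
--     # Two phases instead of interleaved recursion:
--     # (1) iterative DFS with an explicit stack of (node, children, index) frames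
--     #     collecting the pre-order edge events,
--     # (2) replay the event list into foundBags.
--     events = []
--     frames = [(bagToLookFrom, bags.get(bagToLookFrom, []), 0)]
--     while frames:
--         x, cs, i = frames.pop()
--         if i < len(cs):
--             bag = cs[i]
--             events.append((x, bag))
--             frames.append((x, cs, i + 1))
--             frames.append((bag[0], bags.get(bag[0], []), 0))
--     for x, bag in events:
--         if x in foundBags:
--             foundBags[x].append(bag)
--         else:
--             foundBags[x] = [bag]
--     return foundBags
-- ===== Notes on version B (the rewrite author's own statement) =====
-- stated objective: alternative
-- what changed: A's interleaved recursion is replaced by two separate passes: an iterative DFS over an explicit (node, children, index) frame stack that first collects the flat pre-order list of edge events, and then a plain replay loop that folds those events into foundBags; Pre_ excludes inputs with a cycle reachable from bagToLookFrom, on which A recurses forever (RecursionError) and B loops forever.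
import Mathlib
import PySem

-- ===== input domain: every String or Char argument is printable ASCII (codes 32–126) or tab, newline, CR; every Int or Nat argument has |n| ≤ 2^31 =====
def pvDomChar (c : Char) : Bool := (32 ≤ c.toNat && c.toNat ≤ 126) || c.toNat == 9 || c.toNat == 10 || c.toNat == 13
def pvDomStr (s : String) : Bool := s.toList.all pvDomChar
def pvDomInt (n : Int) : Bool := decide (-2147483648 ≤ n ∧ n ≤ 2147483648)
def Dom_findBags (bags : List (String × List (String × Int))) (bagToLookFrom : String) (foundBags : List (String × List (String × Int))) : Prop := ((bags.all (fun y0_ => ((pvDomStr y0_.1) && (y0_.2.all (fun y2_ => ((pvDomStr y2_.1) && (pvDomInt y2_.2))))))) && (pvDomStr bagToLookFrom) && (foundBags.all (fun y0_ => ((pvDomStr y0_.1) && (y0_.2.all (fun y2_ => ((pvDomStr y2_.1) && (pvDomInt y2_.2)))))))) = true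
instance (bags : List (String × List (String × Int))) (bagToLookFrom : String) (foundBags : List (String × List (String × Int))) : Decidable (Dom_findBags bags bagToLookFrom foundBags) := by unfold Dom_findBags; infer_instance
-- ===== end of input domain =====

-- B splits A's interleaved recursion into two passes: an explicit frame-stack DFS that
-- collects the flat pre-order list of edge events, then a replay loop folding the events
-- into foundBags; A mutates foundBags in place — the equivalence proved here is about the
-- RETURN value only. Objective: alternative decomposition, no speed claim.

-- ===== PORT A =====
-- A's `if k in foundBags: foundBags[k].append(bag) else: foundBags[k] = [bag]`
def pvAppendA (fb : PySem.Dict String (List (String × Int))) (k : String) (bag : String × Int) :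
    PySem.Dict String (List (String × Int)) :=
  if fb.contains k then fb.modify k [] (· ++ [bag]) else fb.insert k [bag]

-- A's recursion, with a fuel counter as a totality guard only: under Pre_ (no cycle
-- reachable from the start) the recursion depth is at most the number of keys, so
-- fuel `bags.length + 1` is never exhausted (proved below).
def pvGoA (bags : PySem.Dict String (List (String × Int))) :
    Nat → String → PySem.Dict String (List (String × Int)) → PySem.Dict String (List (String × Int))
  | 0, _, fb => fb
  | f + 1, x, fb =>
    match bags.get? x with
    | none => fb
    | some cs => cs.foldl (fun fb bag => pvGoA bags f bag.1 (pvAppendA fb x bag)) fb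

def findBags (bags : List (String × List (String × Int))) (bagToLookFrom : String) (foundBags : List (String × List (String × Int))) : List (String × List (String × Int)) :=
  (pvGoA (PySem.Dict.mk bags) (bags.length + 1) bagToLookFrom (PySem.Dict.mk foundBags)).items

-- ===== PORT B =====
-- B phase 1: the `while frames:` loop; the list head is the top of the frame stack, a
-- frame is (node, its children, next index); `cs[i]?` is B's `i < len(cs)` test + fetch.
-- The fuel counts loop iterations (pops) and is a totality guard only: under Pre_ the
-- loop performs fewer than pvFuelB iterations (proved below).
def pvEventsB (bags : PySem.Dict String (List (String × Int))) :
    Nat → List (String × List (String × Int) × Nat) → List (String × (String × Int)) →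
    List (String × (String × Int))
  | 0, _, acc => acc
  | _ + 1, [], acc => acc
  | f + 1, (x, cs, i) :: rest, acc =>
    match cs[i]? with
    | none => pvEventsB bags f rest acc
    | some bag =>
      pvEventsB bags f ((bag.1, (bags.get? bag.1).getD [], 0) :: (x, cs, i + 1) :: rest)
        (acc ++ [(x, bag)])

-- B phase 2: `for x, bag in events:` replay into foundBags
def pvReplayB (fb : PySem.Dict String (List (String × Int)))
    (events : List (String × (String × Int))) : PySem.Dict String (List (String × Int)) :=
  events.foldl (fun fb e =>
    if fb.contains e.1 then fb.modify e.1 [] (· ++ [e.2]) else fb.insert e.1 [e.2]) fb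

def pvFuelB (bags : List (String × List (String × Int))) : Nat :=
  ((bags.map (fun p => p.2.length)).sum + 2) ^ (bags.length + 1)

def findBags_alt (bags : List (String × List (String × Int))) (bagToLookFrom : String) (foundBags : List (String × List (String × Int))) : List (String × List (String × Int)) :=
  (pvReplayB (PySem.Dict.mk foundBags)
    (pvEventsB (PySem.Dict.mk bags) (pvFuelB bags)
      [(bagToLookFrom, ((PySem.Dict.mk bags).get? bagToLookFrom).getD [], 0)] [])).items

-- ===== PRECONDITION & SPEC =====
-- the successor bag names of x in the bags graph
def pvSuccs (bags : List (String × List (String × Int))) (x : String) : List String :=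
  (((PySem.Dict.mk bags).get? x).getD []).map Prod.fst

def pvStep (bags : List (String × List (String × Int))) (s : Finset String) : Finset String :=
  s ∪ s.biUnion (fun x => (pvSuccs bags x).toFinset)

-- all bag names reachable from x (iterating the one-step expansion to saturation)
def pvReach (bags : List (String × List (String × Int))) (x : String) : Finset String :=
  (pvStep bags)^[(bags.map (fun p => p.2.length)).sum + 1] {x}

-- Pre_ excludes exactly the inputs with a cycle reachable from bagToLookFrom: there the
-- Python A recurses forever (RecursionError) and the Python B's loop never terminates.
def Pre_findBags (bags : List (String × List (String × Int))) (bagToLookFrom : String) (foundBags : List (String × List (String × Int))) : Prop :=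
  ∀ x ∈ pvReach bags bagToLookFrom, ∀ y ∈ pvSuccs bags x, x ∉ pvReach bags y

instance (bags : List (String × List (String × Int))) (bagToLookFrom : String) (foundBags : List (String × List (String × Int))) : Decidable (Pre_findBags bags bagToLookFrom foundBags) := by unfold Pre_findBags; infer_instance

def pvWitness_findBags : (List (String × List (String × Int))) × String × (List (String × List (String × Int))) :=
  ([("a", [("b", 1), ("c", 2)]), ("b", [("c", 3)])], "a", [("d", [("a", 1)])])

def Spec_findBags (bags : List (String × List (String × Int))) (bagToLookFrom : String) (foundBags : List (String × List (String × Int))) (out : List (String × List (String × Int))) : Prop := out = findBags_alt bags bagToLookFrom foundBags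
instance (bags : List (String × List (String × Int))) (bagToLookFrom : String) (foundBags : List (String × List (String × Int))) (out : List (String × List (String × Int))) : Decidable (Spec_findBags bags bagToLookFrom foundBags out) := by unfold Spec_findBags; infer_instance

-- ===== CLAIM (what is proved, stated in full; the proofs are below) =====
def Claim_equal_findBags : Prop := ∀ (bags : List (String × List (String × Int))) (bagToLookFrom : String) (foundBags : List (String × List (String × Int))), Dom_findBags bags bagToLookFrom foundBags → Pre_findBags bags bagToLookFrom foundBags → Spec_findBags bags bagToLookFrom foundBags (findBags bags bagToLookFrom foundBags)

-- ===== LEMMAS AND PROOFS =====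

-- Big-step relation for the traversal: `.inl x` = visiting node x, `.inr (x, cs)` =
-- processing the pending child list cs of x; ev is the emitted pre-order edge-event
-- list, d the recursion depth, s the number of frame-loop iterations.
inductive PvEv (bags : PySem.Dict String (List (String × Int))) :
    (String ⊕ (String × List (String × Int))) →
    List (String × (String × Int)) → Nat → Nat → Prop where
  | vnone {x} (h : bags.get? x = none) : PvEv bags (.inl x) [] 0 1
  | vsome {x cs ev d s} (h : bags.get? x = some cs)
      (hl : PvEv bags (.inr (x, cs)) ev d s) : PvEv bags (.inl x) ev (d + 1) (s + 1)
  | lnil {x} : PvEv bags (.inr (x, [])) [] 0 0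
  | lcons {x bag cs ev1 ev2 d1 s1 d2 s2}
      (h1 : PvEv bags (.inl bag.1) ev1 d1 s1)
      (h2 : PvEv bags (.inr (x, cs)) ev2 d2 s2) :
      PvEv bags (.inr (x, bag :: cs)) ((x, bag) :: (ev1 ++ ev2)) (max d1 d2) (1 + s1 + s2)

-- A's fueled recursion computes the REPLAY of the event list, whenever fuel > depth.
lemma pvGoA_of_ev {bags : PySem.Dict String (List (String × Int))}
    {t ev d s} (h : PvEv bags t ev d s) :
    (∀ x, t = Sum.inl x → ∀ f, d < f → ∀ fb, pvGoA bags f x fb = pvReplayB fb ev) ∧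
    (∀ x cs, t = Sum.inr (x, cs) → ∀ f, d < f → ∀ fb,
      cs.foldl (fun fb bag => pvGoA bags f bag.1 (pvAppendA fb x bag)) fb = pvReplayB fb ev) := by
  induction h with
  | @vnone x h =>
    refine ⟨?_, ?_⟩
    · rintro x' he f hf fb
      injection he with hx; subst hx
      obtain ⟨g, rfl⟩ := Nat.exists_eq_add_of_lt hf
      simp [pvGoA, h, pvReplayB]
    · rintro x' cs' he; cases he
  | @vsome x cs ev dL sL h hl ih =>
    refine ⟨?_, ?_⟩
    · rintro x' he f hf fb
      injection he with hx; subst hx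
      obtain ⟨g, rfl⟩ := Nat.exists_eq_add_of_lt hf
      simp only [pvGoA, h]
      exact ih.2 x cs rfl (dL + 1 + g) (by omega) fb
    · rintro x' cs' he; cases he
  | @lnil x =>
    refine ⟨?_, ?_⟩
    · rintro x' he; cases he
    · rintro x' cs' he f hf fb
      injection he with he1
      injection he1 with hx hcs; subst hx; subst hcs
      simp [pvReplayB]
  | @lcons x bag cs ev1 ev2 d1 s1 d2 s2 h1 h2 ih1 ih2 =>
    refine ⟨?_, ?_⟩
    · rintro x' he; cases he
    · rintro x' cs' he f hf fb
      injection he with he1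
      injection he1 with hx hcs; subst hx; subst hcs
      simp only [List.foldl_cons]
      rw [ih1.1 bag.1 rfl f (by omega)]
      rw [ih2.2 x cs rfl f (by omega)]
      simp [pvReplayB, List.foldl_append, pvAppendA]
  -- (pvAppendA unfolds to the same step function as the replay's)

-- B's frame loop: a derivation with s iterations peels its frames off and appends ev.
lemma pvEventsB_of_ev {bags : PySem.Dict String (List (String × Int))}
    {t ev d s} (h : PvEv bags t ev d s) :
    (∀ x, t = Sum.inl x → ∀ rest acc f,
      pvEventsB bags (s + f) ((x, (bags.get? x).getD [], 0) :: rest) acc =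
        pvEventsB bags f rest (acc ++ ev)) ∧
    (∀ x cs, t = Sum.inr (x, cs) → ∀ cs0 i, cs0.drop i = cs → ∀ rest acc f,
      pvEventsB bags (s + 1 + f) ((x, cs0, i) :: rest) acc =
        pvEventsB bags f rest (acc ++ ev)) := by
  induction h with
  | @vnone x h =>
    refine ⟨?_, ?_⟩
    · rintro x' he rest acc f
      injection he with hx; subst hx
      rw [Nat.add_comm 1 f]
      simp [pvEventsB, h]
    · rintro x' cs' he; cases he
  | @vsome x cs ev dL sL h hl ih =>
    refine ⟨?_, ?_⟩
    · rintro x' he rest acc f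
      injection he with hx; subst hx
      rw [h]
      exact ih.2 x cs rfl cs 0 (by simp) rest acc f
    · rintro x' cs' he; cases he
  | @lnil x =>
    refine ⟨?_, ?_⟩
    · rintro x' he; cases he
    · rintro x' cs' he cs0 i hdrop rest acc f
      injection he with he1
      injection he1 with hx hcs; subst hx; subst hcs
      have hnone : cs0[i]? = none := by
        have h0 : cs0[i]? = (cs0.drop i)[0]? := by
          simp [List.getElem?_drop]
        rw [h0, hdrop]; simp
      rw [show 0 + 1 + f = f + 1 by omega]
      simp [pvEventsB, hnone]
  | @lcons x bag cs ev1 ev2 d1 s1 d2 s2 h1 h2 ih1 ih2 =>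
    refine ⟨?_, ?_⟩
    · rintro x' he; cases he
    · rintro x' cs' he cs0 i hdrop rest acc f
      injection he with he1
      injection he1 with hx hcs; subst hx; subst hcs
      have hget : cs0[i]? = some bag := by
        have h0 : cs0[i]? = (cs0.drop i)[0]? := by
          simp [List.getElem?_drop]
        rw [h0, hdrop]; simp
      have hdrop' : cs0.drop (i + 1) = cs := by
        have : cs0.drop (i + 1) = (cs0.drop i).drop 1 := by
          rw [List.drop_drop]
        rw [this, hdrop]; simp
      rw [show 1 + s1 + s2 + 1 + f = (s1 + (s2 + 1 + f)) + 1 by omega]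
      simp only [pvEventsB, hget]
      rw [ih1.1 bag.1 rfl ((x, cs0, i + 1) :: rest) (acc ++ [(x, bag)]) (s2 + 1 + f)]
      rw [ih2.2 x cs rfl cs0 (i + 1) hdrop' rest (acc ++ [(x, bag)] ++ ev1) f]
      simp

-- once the frame stack is empty the loop returns the accumulator, for any fuel
lemma pvEventsB_nil (bags : PySem.Dict String (List (String × Int))) (f : Nat)
    (acc : List (String × (String × Int))) : pvEventsB bags f [] acc = acc := by
  cases f <;> rfl

-- the total number of children occurrences in the dict
def pvTotal (bags : PySem.Dict String (List (String × Int))) : Nat :=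
  (bags.items.map (fun p => p.2.length)).sum

lemma pvLookup_len_le {bags : PySem.Dict String (List (String × Int))} {x cs}
    (h : bags.get? x = some cs) : cs.length ≤ pvTotal bags := by
  have hm : (x, cs) ∈ bags.items := PySem.Dict.mem_items_of_get?_eq_some _ h
  have : cs.length ∈ bags.items.map (fun p => p.2.length) := List.mem_map_of_mem hm
  exact List.single_le_sum (fun _ _ => Nat.zero_le _) _ this

-- iteration-count bound: s + 1 ≤ (T+2)^(d+1) for visits, s ≤ |cs|·(T+2)^(d+1) for lists.
lemma pvEv_steps_le {bags : PySem.Dict String (List (String × Int))}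
    {t ev d s} (h : PvEv bags t ev d s) :
    (∀ x, t = Sum.inl x → s + 1 ≤ (pvTotal bags + 2) ^ (d + 1)) ∧
    (∀ x cs, t = Sum.inr (x, cs) → s ≤ cs.length * (pvTotal bags + 2) ^ (d + 1)) := by
  induction h with
  | @vnone x h =>
    refine ⟨?_, ?_⟩
    · intro _ _
      simp only [zero_add, pow_one]
      omega
    · rintro x' cs' he; cases he
  | @vsome x cs ev dL sL h hl ih =>
    refine ⟨?_, ?_⟩
    · intro _ _
      have hsL : sL ≤ cs.length * (pvTotal bags + 2) ^ (dL + 1) := ih.2 x cs rfl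
      have hcs := pvLookup_len_le h
      have h1 : cs.length * (pvTotal bags + 2) ^ (dL + 1) ≤
          pvTotal bags * (pvTotal bags + 2) ^ (dL + 1) := Nat.mul_le_mul_right _ hcs
      have h2 : 1 ≤ (pvTotal bags + 2) ^ (dL + 1) := Nat.one_le_pow _ _ (by omega)
      have hstep : (pvTotal bags + 2) ^ (dL + 1 + 1) =
          pvTotal bags * (pvTotal bags + 2) ^ (dL + 1) + 2 * (pvTotal bags + 2) ^ (dL + 1) := by
        rw [pow_succ]; ring
      rw [hstep]
      omega
    · rintro x' cs' he; cases he
  | @lnil x =>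
    refine ⟨?_, ?_⟩
    · intro _ he; cases he
    · rintro x' cs' he
      injection he with he1
      injection he1 with hx hcs; subst hx; subst hcs
      simp
  | @lcons x bag cs ev1 ev2 d1 s1 d2 s2 h1 h2 ih1 ih2 =>
    refine ⟨?_, ?_⟩
    · intro _ he; cases he
    · rintro x' cs' he
      injection he with he1
      injection he1 with hx hcs; subst hx; subst hcs
      have hpow1 : (pvTotal bags + 2) ^ (d1 + 1) ≤ (pvTotal bags + 2) ^ (max d1 d2 + 1) :=
        Nat.pow_le_pow_right (by omega) (by omega)
      have hpow2 : (pvTotal bags + 2) ^ (d2 + 1) ≤ (pvTotal bags + 2) ^ (max d1 d2 + 1) :=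
        Nat.pow_le_pow_right (by omega) (by omega)
      have h1' : s1 + 1 ≤ (pvTotal bags + 2) ^ (max d1 d2 + 1) :=
        le_trans (ih1.1 bag.1 rfl) hpow1
      have h2' : s2 ≤ cs.length * (pvTotal bags + 2) ^ (max d1 d2 + 1) :=
        le_trans (ih2.2 x cs rfl) (Nat.mul_le_mul_left _ hpow2)
      have hlen : (bag :: cs).length * (pvTotal bags + 2) ^ (max d1 d2 + 1) =
          (pvTotal bags + 2) ^ (max d1 d2 + 1) + cs.length * (pvTotal bags + 2) ^ (max d1 d2 + 1) := by
        rw [List.length_cons]; ring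
      rw [hlen]
      omega

-- ---- reachability facts ----

lemma pvStep_infl (bags : List (String × List (String × Int))) (s : Finset String) :
    s ⊆ pvStep bags s := Finset.subset_union_left

lemma pvIter_infl (bags : List (String × List (String × Int))) (s : Finset String) (k : Nat) :
    s ⊆ (pvStep bags)^[k] s := by
  induction k with
  | zero => simp
  | succ k ih =>
    rw [Function.iterate_succ_apply']
    exact subset_trans ih (pvStep_infl bags _)

-- universe bound: everything reachable from x is x or some child name
def pvUniv (bags : List (String × List (String × Int))) (x : String) : Finset String :=
  insert x (bags.flatMap (fun p => p.2.map Prod.fst)).toFinset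

lemma pvSuccs_subset_univ (bags : List (String × List (String × Int))) (z x : String) :
    (pvSuccs bags z).toFinset ⊆ pvUniv bags x := by
  intro y hy
  simp only [List.mem_toFinset, pvSuccs] at hy
  unfold pvUniv
  rcases hget : (PySem.Dict.mk bags).get? z with _ | cs
  · rw [hget] at hy; simp at hy
  · rw [hget] at hy
    simp only [Option.getD_some] at hy
    obtain ⟨bag, hbag, rfl⟩ := List.mem_map.mp hy
    have hm : (z, cs) ∈ (PySem.Dict.mk bags).items := PySem.Dict.mem_items_of_get?_eq_some _ hget
    apply Finset.mem_insert_of_mem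
    simp only [List.mem_toFinset, List.mem_flatMap]
    exact ⟨(z, cs), hm, List.mem_map_of_mem hbag⟩

lemma pvStep_subset_univ (bags : List (String × List (String × Int))) (x : String)
    {s : Finset String} (h : s ⊆ pvUniv bags x) : pvStep bags s ⊆ pvUniv bags x := by
  unfold pvStep
  apply Finset.union_subset h
  apply Finset.biUnion_subset.mpr
  intro z _
  exact pvSuccs_subset_univ bags z x

lemma pvIter_subset_univ (bags : List (String × List (String × Int))) (x : String) (k : Nat) :
    (pvStep bags)^[k] {x} ⊆ pvUniv bags x := by
  induction k with
  | zero => simp [pvUniv]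
  | succ k ih =>
    rw [Function.iterate_succ_apply']
    exact pvStep_subset_univ bags x ih

lemma pvUniv_card_le (bags : List (String × List (String × Int))) (x : String) :
    (pvUniv bags x).card ≤ (bags.map (fun p => p.2.length)).sum + 1 := by
  unfold pvUniv
  calc (insert x (bags.flatMap (fun p => p.2.map Prod.fst)).toFinset).card
      ≤ (bags.flatMap (fun p => p.2.map Prod.fst)).toFinset.card + 1 := Finset.card_insert_le _ _
    _ ≤ (bags.flatMap (fun p => p.2.map Prod.fst)).length + 1 :=
        Nat.add_le_add_right (List.toFinset_card_le _) _
    _ = (bags.map (fun p => p.2.length)).sum + 1 := by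
        simp [List.length_flatMap]

-- saturation: pvReach is a fixpoint of pvStep
lemma pvIter_card_ge (bags : List (String × List (String × Int))) (x : String) (k : Nat)
    (h : ∀ j < k, pvStep bags ((pvStep bags)^[j] {x}) ≠ (pvStep bags)^[j] {x}) :
    k + 1 ≤ ((pvStep bags)^[k] {x}).card := by
  induction k with
  | zero => simp
  | succ k ih =>
    have hk := ih (fun j hj => h j (by omega))
    have hne := h k (by omega)
    have hss : (pvStep bags)^[k] {x} ⊂ pvStep bags ((pvStep bags)^[k] {x}) :=
      Finset.ssubset_iff_subset_ne.mpr ⟨pvStep_infl bags _, Ne.symm hne⟩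
    have := Finset.card_lt_card hss
    rw [Function.iterate_succ_apply']
    omega

lemma pvReach_fix (bags : List (String × List (String × Int))) (x : String) :
    pvStep bags (pvReach bags x) = pvReach bags x := by
  set T := (bags.map (fun p => p.2.length)).sum with hT
  by_cases hfix : ∃ k ≤ T, pvStep bags ((pvStep bags)^[k] {x}) = (pvStep bags)^[k] {x}
  · obtain ⟨k, hk, hfx⟩ := hfix
    have hrest : ∀ m, (pvStep bags)^[k + m] {x} = (pvStep bags)^[k] {x} := by
      intro m
      induction m with
      | zero => rfl
      | succ m ih =>
        rw [show k + (m + 1) = (k + m) + 1 by omega, Function.iterate_succ_apply', ih, hfx]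
    unfold pvReach
    rw [← hT, show T + 1 = k + (T + 1 - k) by omega, hrest, hfx]
  · push_neg at hfix
    exfalso
    have hge := pvIter_card_ge bags x (T + 1) (by
      intro j hj
      exact hfix j (by omega))
    have hle : ((pvStep bags)^[T + 1] {x}).card ≤ T + 1 :=
      le_trans (Finset.card_le_card (pvIter_subset_univ bags x _)) (pvUniv_card_le bags x)
    omega

lemma pvReach_init (bags : List (String × List (String × Int))) (x : String) :
    x ∈ pvReach bags x := pvIter_infl bags {x} _ (Finset.mem_singleton_self x)

lemma pvReach_closed (bags : List (String × List (String × Int))) {x z y : String}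
    (hz : z ∈ pvReach bags x) (hy : y ∈ pvSuccs bags z) : y ∈ pvReach bags x := by
  rw [← pvReach_fix bags x]
  unfold pvStep
  apply Finset.mem_union_right
  exact Finset.mem_biUnion.mpr ⟨z, hz, List.mem_toFinset.mpr hy⟩

lemma pvReach_least (bags : List (String × List (String × Int))) {y : String}
    {T : Finset String} (hy : y ∈ T)
    (hcl : ∀ z ∈ T, ∀ w ∈ pvSuccs bags z, w ∈ T) : pvReach bags y ⊆ T := by
  unfold pvReach
  generalize (bags.map (fun p => p.2.length)).sum + 1 = k
  induction k with
  | zero => exact Finset.singleton_subset_iff.mpr hy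
  | succ k ih =>
    rw [Function.iterate_succ_apply']
    unfold pvStep
    apply Finset.union_subset ih
    apply Finset.biUnion_subset.mpr
    intro z hz w hw
    exact hcl z (ih hz) w (List.mem_toFinset.mp hw)

-- the measure: number of keys of bags reachable from x
def pvMu (bags : List (String × List (String × Int))) (x : String) : Nat :=
  ((pvReach bags x).filter (fun y => ((PySem.Dict.mk bags).get? y).isSome)).card

lemma pvMu_lt {bags : List (String × List (String × Int))} {start x y : String}
    (hPre : ∀ z ∈ pvReach bags start, ∀ w ∈ pvSuccs bags z, z ∉ pvReach bags w)
    (hx : x ∈ pvReach bags start) (hkey : ((PySem.Dict.mk bags).get? x).isSome)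
    (hy : y ∈ pvSuccs bags x) : pvMu bags y < pvMu bags x := by
  have hsub : pvReach bags y ⊆ pvReach bags x :=
    pvReach_least bags (pvReach_closed bags (pvReach_init bags x) hy)
      (fun z hz w hw => pvReach_closed bags hz hw)
  have hxny : x ∉ pvReach bags y := hPre x hx y hy
  apply Finset.card_lt_card
  refine (Finset.ssubset_iff_of_subset (Finset.filter_subset_filter _ hsub)).mpr ?_
  refine ⟨x, Finset.mem_filter.mpr ⟨pvReach_init bags x, hkey⟩, ?_⟩
  intro hcon
  exact hxny (Finset.mem_filter.mp hcon).1

lemma pvMu_le (bags : List (String × List (String × Int))) (x : String) :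
    pvMu bags x ≤ bags.length := by
  unfold pvMu
  calc ((pvReach bags x).filter (fun y => ((PySem.Dict.mk bags).get? y).isSome)).card
      ≤ ((PySem.Dict.mk bags).keys.toFinset).card := by
        apply Finset.card_le_card
        intro y hy
        obtain ⟨-, hkey⟩ := Finset.mem_filter.mp hy
        obtain ⟨cs, hcs⟩ := Option.isSome_iff_exists.mp hkey
        exact List.mem_toFinset.mpr
          (PySem.Dict.mem_keys_of_mem_items _ (PySem.Dict.mem_items_of_get?_eq_some _ hcs))
    _ ≤ (PySem.Dict.mk bags).keys.length := List.toFinset_card_le _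
    _ = bags.length := by simp [PySem.Dict.keys]

-- existence of a big-step derivation with depth bounded by the measure
lemma pvEv_exists {bags : List (String × List (String × Int))} {start : String}
    (hPre : ∀ z ∈ pvReach bags start, ∀ w ∈ pvSuccs bags z, z ∉ pvReach bags w) :
    ∀ (m : Nat) (x : String), pvMu bags x ≤ m → x ∈ pvReach bags start →
      ∃ ev d s, PvEv (PySem.Dict.mk bags) (.inl x) ev d s ∧ d ≤ pvMu bags x := by
  intro m
  induction m with
  | zero =>
    intro x hm hx
    rcases hget : (PySem.Dict.mk bags).get? x with _ | cs
    · exact ⟨[], 0, 1, PvEv.vnone hget, Nat.zero_le _⟩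
    · exfalso
      have : x ∈ (pvReach bags x).filter (fun y => ((PySem.Dict.mk bags).get? y).isSome) :=
        Finset.mem_filter.mpr ⟨pvReach_init bags x, by simp [hget]⟩
      have : 1 ≤ pvMu bags x := Finset.card_pos.mpr ⟨x, this⟩
      omega
  | succ m ih =>
    intro x hm hx
    rcases hget : (PySem.Dict.mk bags).get? x with _ | cs
    · exact ⟨[], 0, 1, PvEv.vnone hget, Nat.zero_le _⟩
    · have hkey : ((PySem.Dict.mk bags).get? x).isSome := by simp [hget]
      have hx1 : 1 ≤ pvMu bags x := by
        apply Finset.card_pos.mpr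
        exact ⟨x, Finset.mem_filter.mpr ⟨pvReach_init bags x, hkey⟩⟩
      have hlist : ∀ (cs' : List (String × Int)), (∀ bag ∈ cs', bag.1 ∈ pvSuccs bags x) →
          ∃ ev d s, PvEv (PySem.Dict.mk bags) (.inr (x, cs')) ev d s ∧
            d + 1 ≤ pvMu bags x := by
        intro cs'
        induction cs' with
        | nil => intro _; exact ⟨[], 0, 0, PvEv.lnil, hx1⟩
        | cons bag rest ihcs =>
          intro hmem
          have hsucc : bag.1 ∈ pvSuccs bags x := hmem bag (List.mem_cons_self)
          have hreach : bag.1 ∈ pvReach bags start := pvReach_closed bags hx hsucc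
          have hmu : pvMu bags bag.1 < pvMu bags x := pvMu_lt hPre hx hkey hsucc
          obtain ⟨ev1, d1, s1, hev1, hd1⟩ := ih bag.1 (by omega) hreach
          obtain ⟨ev2, d2, s2, hev2, hd2⟩ :=
            ihcs (fun b hb => hmem b (List.mem_cons_of_mem _ hb))
          exact ⟨(x, bag) :: (ev1 ++ ev2), max d1 d2, 1 + s1 + s2,
            PvEv.lcons hev1 hev2, by omega⟩
      have hchild : ∀ bag ∈ cs, bag.1 ∈ pvSuccs bags x := by
        intro bag hbag
        simp only [pvSuccs, hget, Option.getD_some]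
        exact List.mem_map_of_mem hbag
      obtain ⟨ev, dL, sL, hevL, hdL⟩ := hlist cs hchild
      exact ⟨ev, dL + 1, sL + 1, PvEv.vsome hget hevL, hdL⟩

lemma pvTotal_mk (bags : List (String × List (String × Int))) :
    pvTotal (PySem.Dict.mk bags) = (bags.map (fun p => p.2.length)).sum := by
  rfl

-- ===== VERDICT (by name: the statement is the Claim_ definition above) =====
theorem findBags_spec : Claim_equal_findBags := by
  intro bags start fb _hdom hPre
  unfold Spec_findBags findBags findBags_alt
  unfold Pre_findBags at hPre
  have hPre' : ∀ z ∈ pvReach bags start, ∀ w ∈ pvSuccs bags z, z ∉ pvReach bags w := hPre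
  obtain ⟨ev, d, s, hev, hd⟩ :=
    pvEv_exists hPre' (pvMu bags start) start le_rfl (pvReach_init bags start)
  -- A side: depth < fuel, so A computes the replay of ev
  have hdn : d < bags.length + 1 := by
    have := pvMu_le bags start
    omega
  have hA : pvGoA (PySem.Dict.mk bags) (bags.length + 1) start (PySem.Dict.mk fb) =
      pvReplayB (PySem.Dict.mk fb) ev :=
    (pvGoA_of_ev hev).1 start rfl (bags.length + 1) hdn (PySem.Dict.mk fb)
  -- B side: loop iterations < fuel, so phase 1 produces exactly ev
  have hs : s + 1 ≤ (pvTotal (PySem.Dict.mk bags) + 2) ^ (d + 1) :=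
    (pvEv_steps_le hev).1 start rfl
  have hsF : s ≤ pvFuelB bags := by
    have hpow : (pvTotal (PySem.Dict.mk bags) + 2) ^ (d + 1) ≤
        (pvTotal (PySem.Dict.mk bags) + 2) ^ (bags.length + 1) := by
      apply Nat.pow_le_pow_right (by omega)
      have := pvMu_le bags start
      omega
    unfold pvFuelB
    rw [← pvTotal_mk bags]
    omega
  have hB : pvEventsB (PySem.Dict.mk bags) (pvFuelB bags)
      [(start, ((PySem.Dict.mk bags).get? start).getD [], 0)] [] = ev := by
    have hstep := (pvEventsB_of_ev hev).1 start rfl ([] : List (String × List (String × Int) × Nat))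
      ([] : List (String × (String × Int))) (pvFuelB bags - s)
    rw [show s + (pvFuelB bags - s) = pvFuelB bags by omega] at hstep
    rw [hstep, pvEventsB_nil]
    simp
  rw [hA, hB]
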